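-- pv_equiv track=rewrite | github.com/Gerax5/FirstFollow | main.py | processProd
-- ===== SOURCE A (Python) =====
-- from typing import List, Union
--
-- def processProd(prod: str) -> List[str]:
--     tokens = []
--     i = 0
--     while i < len(prod):
--
--         if prod[i].islower():
--             buffer = prod[i]
--             i += 1
--             while i < len(prod) and prod[i].islower():
--                 buffer += prod[i]
--                 i += 1
--             tokens.append(buffer)
--
--         elif prod[i].isupper():
--             buffer = prod[i]
--             i += 1
--
--             while i < len(prod) and prod[i] == "'":
--                 buffer += prod[i]
--                 i += 1
--             tokens.append(buffer)
--         elif prod[i] == "'":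
--
--             tokens.append("'")
--             i += 1
--         else:
--             tokens.append(prod[i])
--             i += 1
--     return tokens
-- ===== SOURCE B (Python) =====
-- def processProd(prod):
--     tokens = []
--     mode = 'none'
--     for ch in prod:
--         if ch.islower():
--             if mode == 'lower':
--                 tokens[-1] += ch
--             else:
--                 tokens.append(ch)
--                 mode = 'lower'
--         elif ch.isupper():
--             tokens.append(ch)
--             mode = 'upper'
--         elif ch == "'":
--             if mode == 'upper':
--                 tokens[-1] += ch
--             else:
--                 tokens.append("'")
--                 mode = 'none'
--         else:
--             tokens.append(ch)
--             mode = 'none'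
--     return tokens
-- ===== Notes on version B (the rewrite author's own statement) =====
-- stated objective: simpler
-- what changed: Replaces A's nested while-loops with index arithmetic by a single flat for-loop over the characters that carries a mode state and mutates the last token in place.
import Mathlib
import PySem

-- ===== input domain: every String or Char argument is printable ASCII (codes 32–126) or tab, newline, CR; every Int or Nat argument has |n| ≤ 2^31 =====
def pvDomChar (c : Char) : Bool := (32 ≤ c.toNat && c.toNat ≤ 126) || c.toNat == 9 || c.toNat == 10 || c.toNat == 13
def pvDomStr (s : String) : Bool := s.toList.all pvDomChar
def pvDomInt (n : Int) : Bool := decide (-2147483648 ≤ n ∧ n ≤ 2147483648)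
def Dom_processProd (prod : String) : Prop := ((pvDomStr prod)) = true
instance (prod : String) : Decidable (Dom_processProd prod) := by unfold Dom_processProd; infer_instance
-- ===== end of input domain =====

-- B replaces A's nested while-loops by one flat state-carrying pass; objective: simpler, same cost.

-- ===== PORT A =====
-- tokens are represented as their character lists and turned into Strings at the end
-- (Lean Strings are lists of characters; exact on the ASCII domain).

-- inner while: 'while i < len(prod) and prod[i].islower(): buffer += prod[i]; i += 1'
def pvSpanLowerA (buf : List Char) : List Char → List Char × List Char
  | [] => (buf, [])
  | c :: cs => if c.isLower then pvSpanLowerA (buf ++ [c]) cs else (buf, c :: cs)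

-- inner while: 'while i < len(prod) and prod[i] == "\'": buffer += prod[i]; i += 1'
def pvSpanPrimeA (buf : List Char) : List Char → List Char × List Char
  | [] => (buf, [])
  | c :: cs => if c = '\'' then pvSpanPrimeA (buf ++ [c]) cs else (buf, c :: cs)

theorem pvSpanLowerA_len : ∀ (cs : List Char) (buf : List Char),
    (pvSpanLowerA buf cs).2.length ≤ cs.length := by
  intro cs
  induction cs with
  | nil => intro buf; simp [pvSpanLowerA]
  | cons c cs ih =>
    intro buf
    simp only [pvSpanLowerA]
    split
    · exact Nat.le_trans (ih _) (Nat.le_succ _)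
    · simp

theorem pvSpanPrimeA_len : ∀ (cs : List Char) (buf : List Char),
    (pvSpanPrimeA buf cs).2.length ≤ cs.length := by
  intro cs
  induction cs with
  | nil => intro buf; simp [pvSpanPrimeA]
  | cons c cs ih =>
    intro buf
    simp only [pvSpanPrimeA]
    split
    · exact Nat.le_trans (ih _) (Nat.le_succ _)
    · simp

-- outer while over the characters, one branch per character class, in A's order
def pvProcA : List Char → List (List Char)
  | [] => []
  | c :: cs =>
    if c.isLower then
      let r := pvSpanLowerA [c] cs
      r.1 :: pvProcA r.2
    else if c.isUpper then
      let r := pvSpanPrimeA [c] cs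
      r.1 :: pvProcA r.2
    else if c = '\'' then
      ['\''] :: pvProcA cs
    else
      [c] :: pvProcA cs
termination_by cs => cs.length
decreasing_by
  · exact Nat.lt_succ_of_le (pvSpanLowerA_len cs [c])
  · exact Nat.lt_succ_of_le (pvSpanPrimeA_len cs [c])
  · exact Nat.lt_succ_self _
  · exact Nat.lt_succ_self _

def processProd (prod : String) : List String :=
  (pvProcA prod.toList).map String.mk

-- ===== PORT B =====
inductive PvMode | low | up | non
deriving DecidableEq, Repr

-- B keeps the token list reversed (head = Python's tokens[-1]); 'tokens[-1] += ch' is modifyHead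
def pvStepB (st : List (List Char) × PvMode) (c : Char) : List (List Char) × PvMode :=
  if c.isLower then
    if st.2 = PvMode.low then (st.1.modifyHead (· ++ [c]), PvMode.low)
    else ([c] :: st.1, PvMode.low)
  else if c.isUpper then
    ([c] :: st.1, PvMode.up)
  else if c = '\'' then
    if st.2 = PvMode.up then (st.1.modifyHead (· ++ [c]), PvMode.up)
    else (['\''] :: st.1, PvMode.non)
  else
    ([c] :: st.1, PvMode.non)

def processProd_alt (prod : String) : List String :=
  ((prod.toList.foldl pvStepB ([], PvMode.non)).1.reverse).map String.mk

-- ===== PRECONDITION & SPEC =====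
def Spec_processProd (prod : String) (out : List String) : Prop := out = processProd_alt prod
instance (prod : String) (out : List String) : Decidable (Spec_processProd prod out) := by unfold Spec_processProd; infer_instance

-- ===== CLAIM (what is proved, stated in full; the proofs are below) =====
def Claim_equal_processProd : Prop := ∀ (prod : String), Dom_processProd prod → Spec_processProd prod (processProd prod)

-- ===== LEMMAS AND PROOFS =====

/-- The one combined loop invariant: B's fold from each of its three modes computes
A's remaining tokens, with the pending buffer handled by A's corresponding inner span. -/
theorem pvMain : ∀ (cs : List Char),
    (∀ rev, (List.foldl pvStepB (rev, PvMode.non) cs).1 = (pvProcA cs).reverse ++ rev) ∧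
    (∀ t ts, (List.foldl pvStepB (t :: ts, PvMode.low) cs).1
        = (pvProcA (pvSpanLowerA t cs).2).reverse ++ (pvSpanLowerA t cs).1 :: ts) ∧
    (∀ t ts, (List.foldl pvStepB (t :: ts, PvMode.up) cs).1
        = (pvProcA (pvSpanPrimeA t cs).2).reverse ++ (pvSpanPrimeA t cs).1 :: ts) := by
  intro cs
  induction cs with
  | nil => refine ⟨?_, ?_, ?_⟩ <;> intros <;> simp [pvProcA, pvSpanLowerA, pvSpanPrimeA]
  | cons c cs ih =>
    obtain ⟨ihn, ihl, ihu⟩ := ih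
    by_cases hl : c.isLower
    · -- lower character
      have hstep : ∀ st, pvStepB st c =
          (if st.2 = PvMode.low then (st.1.modifyHead (· ++ [c]), PvMode.low)
           else ([c] :: st.1, PvMode.low)) := by
        intro st; simp [pvStepB, hl]
      refine ⟨?_, ?_, ?_⟩
      · intro rev
        simp only [List.foldl_cons, hstep, reduceCtorEq, reduceIte, if_false, if_true, List.modifyHead]
        rw [ihl]
        simp [pvProcA, hl]
      · intro t ts
        simp only [List.foldl_cons, hstep, reduceCtorEq, reduceIte, if_false, if_true, List.modifyHead]
        rw [ihl]
        simp [pvSpanLowerA, hl]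
      · intro t ts
        have hp : ¬ (c = '\'') := by
          intro h; subst h; simp [Char.isLower] at hl
        simp only [List.foldl_cons, hstep, reduceCtorEq, reduceIte, if_false, if_true, List.modifyHead]
        rw [ihl]
        simp [pvSpanPrimeA, hp, pvProcA, hl]
    · by_cases hu : c.isUpper
      · -- upper character
        have hstep : ∀ st, pvStepB st c = ([c] :: st.1, PvMode.up) := by
          intro st; simp [pvStepB, hl, hu]
        refine ⟨?_, ?_, ?_⟩
        · intro rev
          simp only [List.foldl_cons, hstep]
          rw [ihu]
          simp [pvProcA, hl, hu]
        · intro t ts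
          simp only [List.foldl_cons, hstep]
          rw [ihu]
          simp [pvSpanLowerA, hl, pvProcA, hu]
        · intro t ts
          have hp : ¬ (c = '\'') := by
            intro h; subst h; simp [Char.isUpper] at hu
          simp only [List.foldl_cons, hstep]
          rw [ihu]
          simp [pvSpanPrimeA, hp, pvProcA, hl, hu]
      · by_cases hp : c = '\''
        · -- prime character
          refine ⟨?_, ?_, ?_⟩
          · intro rev
            have hstep : pvStepB (rev, PvMode.non) c = (['\''] :: rev, PvMode.non) := by
              simp [pvStepB, hl, hu, hp]
            simp only [List.foldl_cons, hstep]
            rw [ihn]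
            simp [pvProcA, hl, hu, hp]
          · intro t ts
            have hstep : pvStepB (t :: ts, PvMode.low) c = (['\''] :: t :: ts, PvMode.non) := by
              simp [pvStepB, hl, hu, hp]
            simp only [List.foldl_cons, hstep]
            rw [ihn]
            simp [pvSpanLowerA, hl, pvProcA, hu, hp]
          · intro t ts
            have hstep : pvStepB (t :: ts, PvMode.up) c = ((t ++ [c]) :: ts, PvMode.up) := by
              simp [pvStepB, hl, hu, hp]
            simp only [List.foldl_cons, hstep]
            rw [ihu]
            simp [pvSpanPrimeA, hp]
        · -- any other character
          have hstep : ∀ st, pvStepB st c = ([c] :: st.1, PvMode.non) := by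
            intro st; simp [pvStepB, hl, hu, hp]
          refine ⟨?_, ?_, ?_⟩
          · intro rev
            simp only [List.foldl_cons, hstep]
            rw [ihn]
            simp [pvProcA, hl, hu, hp]
          · intro t ts
            simp only [List.foldl_cons, hstep]
            rw [ihn]
            simp [pvSpanLowerA, hl, pvProcA, hu, hp]
          · intro t ts
            simp only [List.foldl_cons, hstep]
            rw [ihn]
            simp [pvSpanPrimeA, hp, pvProcA, hl, hu]

-- ===== VERDICT (by name: the statement is the Claim_ definition above) =====
theorem processProd_spec : Claim_equal_processProd := by
  intro prod _
  unfold Spec_processProd processProd processProd_alt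
  rw [(pvMain prod.toList).1 []]
  simp
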